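-- pv_equiv track=rewrite | github.com/jonathanyulan99/SDE-Fundamentals | ALL/Formation/Array_Drills/fewer_than_X_values_in_array.py | fewerThanTargetDistinct
-- ===== SOURCE A (Python) =====
-- def fewerThanTargetDistinct(arr: list[int], target: int) -> bool:
--     set_container = set()
--     counter = 0
--
--     for x in arr:
--         if x not in set_container:
--             set_container.add(x)
--             counter += 1
--
--     return counter < target
-- ===== SOURCE B (Python) =====
-- def fewerThanTargetDistinct(arr: list[int], target: int) -> bool:
--     s = sorted(arr)
--     count = 0
--     prev = None
--     for x in s:
--         if prev is None or x != prev: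
--             count += 1
--         prev = x
--     return count < target
-- ===== Notes on version B (the rewrite author's own statement) =====
-- stated objective: alternative
-- what changed: Replaces the hash-set membership loop with sort-then-scan: sort a copy of the array and count value changes between adjacent elements, then compare that distinct count to target.
import Mathlib
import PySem

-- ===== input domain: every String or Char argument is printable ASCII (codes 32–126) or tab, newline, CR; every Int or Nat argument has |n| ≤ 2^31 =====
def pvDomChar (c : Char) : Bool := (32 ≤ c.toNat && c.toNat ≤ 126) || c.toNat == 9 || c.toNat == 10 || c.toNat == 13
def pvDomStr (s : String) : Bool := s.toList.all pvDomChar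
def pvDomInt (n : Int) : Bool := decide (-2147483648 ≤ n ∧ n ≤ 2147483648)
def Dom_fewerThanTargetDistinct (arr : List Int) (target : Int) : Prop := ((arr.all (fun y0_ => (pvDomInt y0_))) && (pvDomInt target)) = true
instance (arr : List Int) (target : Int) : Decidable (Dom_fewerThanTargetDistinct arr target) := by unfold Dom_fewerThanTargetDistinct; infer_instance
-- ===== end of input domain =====

-- B replaces A's hash-set membership loop by sort-then-adjacent-scan: sort a copy, count value
-- changes between neighbours, compare to target (alternative algorithm, same return value).


-- ===== PORT A =====
-- for x in arr: if x not in set_container: add x; counter += 1   — state (set, counter)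
def fewerThanTargetDistinct (arr : List Int) (target : Int) : Bool :=
  let st := arr.foldl
    (fun (st : PySem.Set Int × Int) x =>
      if PySem.Set.contains st.1 x then st else (PySem.Set.add st.1 x, st.2 + 1))
    (PySem.Set.empty, 0)
  decide (st.2 < target)

-- ===== PORT B =====
-- s = sorted(arr); for x in s: if prev is None or x != prev: count += 1; prev = x
def fewerThanTargetDistinct_alt (arr : List Int) (target : Int) : Bool :=
  let s := PySem.List.sorted arr (fun x => x) false
  let st := s.foldl
    (fun (st : Int × Option Int) x =>
      ((if st.2 = none ∨ ¬ st.2 = some x then st.1 + 1 else st.1), some x))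
    (0, none)
  decide (st.1 < target)

-- ===== PRECONDITION & SPEC =====
def Spec_fewerThanTargetDistinct (arr : List Int) (target : Int) (out : Bool) : Prop := out = fewerThanTargetDistinct_alt arr target
instance (arr : List Int) (target : Int) (out : Bool) : Decidable (Spec_fewerThanTargetDistinct arr target out) := by unfold Spec_fewerThanTargetDistinct; infer_instance

-- ===== CLAIM (what is proved, stated in full; the proofs are below) =====
def Claim_equal_fewerThanTargetDistinct : Prop := ∀ (arr : List Int) (target : Int), Dom_fewerThanTargetDistinct arr target → Spec_fewerThanTargetDistinct arr target (fewerThanTargetDistinct arr target)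

-- ===== LEMMAS AND PROOFS =====

-- A's loop: final counter = initial counter + number of values of l not already in the set.
theorem pvA_invariant (l : List Int) (s : PySem.Set Int) (c : Int) :
    (l.foldl
      (fun (st : PySem.Set Int × Int) x =>
        if PySem.Set.contains st.1 x then st else (PySem.Set.add st.1 x, st.2 + 1))
      (s, c)).2 = c + ((l.toFinset \ s.toFinset).card : Int) := by
  induction l generalizing s c with
  | nil => simp
  | cons x l ih =>
    by_cases hx : x ∈ s
    · have hcon : PySem.Set.contains s x = true := (PySem.Set.contains_iff s x).mpr hx
      simp only [List.foldl_cons]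
      rw [if_pos hcon, ih]
      have hsd : (x :: l).toFinset \ s.toFinset = l.toFinset \ s.toFinset := by
        ext y
        simp only [List.toFinset_cons, Finset.mem_sdiff, Finset.mem_insert, List.mem_toFinset]
        constructor
        · rintro ⟨(rfl | hy), hns⟩
          · exact absurd hx hns
          · exact ⟨hy, hns⟩
        · rintro ⟨hy, hns⟩; exact ⟨Or.inr hy, hns⟩
      rw [hsd]
    · have hcon : ¬ PySem.Set.contains s x = true := by
        intro h; exact hx ((PySem.Set.contains_iff s x).mp h)
      simp only [List.foldl_cons]
      rw [if_neg hcon, ih]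
      have hset : (PySem.Set.add s x).toFinset = insert x s.toFinset := by
        rw [PySem.Set.add_of_not_mem hx]; simp
      have key : (x :: l).toFinset \ s.toFinset
          = insert x (l.toFinset \ insert x s.toFinset) := by
        ext y
        simp only [List.toFinset_cons, Finset.mem_sdiff, Finset.mem_insert, List.mem_toFinset,
          not_or]
        constructor
        · rintro ⟨(rfl | hy), hns⟩
          · exact Or.inl rfl
          · by_cases hyx : y = x
            · exact Or.inl hyx
            · exact Or.inr ⟨hy, hyx, hns⟩
        · rintro (rfl | ⟨hy, _, hns⟩)
          · exact ⟨Or.inl rfl, fun h => hx (by simpa using h)⟩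
          · exact ⟨Or.inr hy, hns⟩
      have hxnot : x ∉ l.toFinset \ insert x s.toFinset := by simp
      rw [key, Finset.card_insert_of_notMem hxnot, hset]
      push_cast
      ring

-- B's loop after the first element: all of l is ≥ p, l is sorted; the scan adds one per value > p.
theorem pvB_invariant (l : List Int) (p c : Int)
    (hs : l.Pairwise (· ≤ ·)) (hp : ∀ y ∈ l, p ≤ y) :
    (l.foldl
      (fun (st : Int × Option Int) x =>
        ((if st.2 = none ∨ ¬ st.2 = some x then st.1 + 1 else st.1), some x))
      (c, some p)).1 = c + (((l.toFinset.filter (fun y => p < y)).card : Int)) := by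
  induction l generalizing p c with
  | nil => simp
  | cons x l ih =>
    have hpx : p ≤ x := hp x (List.mem_cons_self ..)
    have hxl : ∀ y ∈ l, x ≤ y := fun y hy => (List.pairwise_cons.mp hs).1 y hy
    have hsl : l.Pairwise (· ≤ ·) := (List.pairwise_cons.mp hs).2
    by_cases hne : x = p
    · subst hne
      simp only [List.foldl_cons]
      rw [if_neg (by simp), ih x c hsl hxl]
      have hf : (x :: l).toFinset.filter (fun y => x < y)
          = l.toFinset.filter (fun y => x < y) := by
        ext y
        simp only [List.toFinset_cons, Finset.mem_filter, Finset.mem_insert, List.mem_toFinset]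
        constructor
        · rintro ⟨(rfl | hy), hlt⟩
          · exact absurd hlt (lt_irrefl y)
          · exact ⟨hy, hlt⟩
        · rintro ⟨hy, hlt⟩; exact ⟨Or.inr hy, hlt⟩
      rw [hf]
    · have hlt : p < x := lt_of_le_of_ne hpx (Ne.symm hne)
      simp only [List.foldl_cons]
      rw [if_pos (Or.inr (by simp; exact fun h => hne h.symm)), ih x (c + 1) hsl hxl]
      have key : (x :: l).toFinset.filter (fun y => p < y)
          = insert x (l.toFinset.filter (fun y => x < y)) := by
        ext y
        simp only [List.toFinset_cons, Finset.mem_filter, Finset.mem_insert, List.mem_toFinset]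
        constructor
        · rintro ⟨(rfl | hy), hgt⟩
          · exact Or.inl rfl
          · rcases lt_or_eq_of_le (hxl y hy) with h | h
            · exact Or.inr ⟨hy, h⟩
            · exact Or.inl h.symm
        · rintro (rfl | ⟨hy, hgt⟩)
          · exact ⟨Or.inl rfl, hlt⟩
          · exact ⟨Or.inr hy, lt_trans hlt hgt⟩
      rw [key, Finset.card_insert_of_notMem (by simp)]
      push_cast
      ring

-- B's full scan counts the distinct values of the (sorted) list.
theorem pvB_count (l : List Int) (hs : l.Pairwise (· ≤ ·)) :
    (l.foldl
      (fun (st : Int × Option Int) x =>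
        ((if st.2 = none ∨ ¬ st.2 = some x then st.1 + 1 else st.1), some x))
      (0, none)).1 = (l.toFinset.card : Int) := by
  cases l with
  | nil => simp
  | cons x l =>
    have hxl : ∀ y ∈ l, x ≤ y := fun y hy => (List.pairwise_cons.mp hs).1 y hy
    have hsl : l.Pairwise (· ≤ ·) := (List.pairwise_cons.mp hs).2
    simp only [List.foldl_cons]
    simp only [true_or, if_true]
    norm_num
    rw [pvB_invariant l x 1 hsl hxl]
    have key : (x :: l).toFinset = insert x (l.toFinset.filter (fun y => x < y)) := by
      ext y
      simp only [List.toFinset_cons, Finset.mem_filter, Finset.mem_insert, List.mem_toFinset]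
      constructor
      · rintro (rfl | hy)
        · exact Or.inl rfl
        · rcases lt_or_eq_of_le (hxl y hy) with h | h
          · exact Or.inr ⟨hy, h⟩
          · exact Or.inl h.symm
      · rintro (rfl | ⟨hy, _⟩)
        · exact Or.inl rfl
        · exact Or.inr hy
    rw [List.toFinset_cons] at key
    rw [key, Finset.card_insert_of_notMem (by simp)]
    push_cast
    ring

-- ===== VERDICT (by name: the statement is the Claim_ definition above) =====
theorem fewerThanTargetDistinct_spec : Claim_equal_fewerThanTargetDistinct := by
  intro arr target _
  unfold Spec_fewerThanTargetDistinct fewerThanTargetDistinct fewerThanTargetDistinct_alt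
  have hA := pvA_invariant arr PySem.Set.empty 0
  have hperm : (PySem.List.sorted arr (fun x => x) false).Perm arr :=
    PySem.List.sorted_perm arr (fun x => x) false
  have hB := pvB_count (PySem.List.sorted arr (fun x => x) false)
    (by simpa using PySem.List.sorted_pairwise arr (fun x => x))
  simp only []
  rw [hA, hB, List.toFinset_eq_of_perm _ _ hperm]
  simp [PySem.Set.empty]
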